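-- pv_equiv track=rewrite | github.com/a1ip/my_check | gol_class.py | life_counter
-- ===== SOURCE A (Python) =====
-- AROUND = ((-1, -1), (-1, 0), (-1, 1),(0, -1),
--           (0, 1), (1, -1), (1, 0), (1, 1))
--
-- CELLS = AROUND + ((0,0),)
--
-- def life_counter(seed, ticks):
--     life = {(x,y) for x in range(len(seed[0])) for
--             y in range(len(seed)) if seed[y][x] == 1}
--     locate = lambda pos1, pos2:(pos1[0]+pos2[0],
--                                   pos1[1]+pos2[1])
--     for __ in range(ticks):
--         new_life = set()
--         for living in life:
--             for pos in (locate(living, cell) for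
--                         cell in CELLS):
--                 count = sum((locate(pos, cell) in life) for
--                             cell in AROUND)
--                 if count == 2:
--                     if pos in life: new_life.add(pos)
--                 elif count == 3:
--                     new_life.add(pos)
--                 else:
--                     pass
--         life = new_life
--     return len(life)
-- ===== SOURCE B (Python) =====
-- AROUND = ((-1, -1), (-1, 0), (-1, 1), (0, -1),
--           (0, 1), (1, -1), (1, 0), (1, 1))
--
-- def life_counter(seed, ticks):
--     width = len(seed[0])
--     life = {(x, y) for y, row in enumerate(seed)
--             for x in range(width) if row[x] == 1}
--     for _ in range(ticks):
--         counts = {}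
--         for (x, y) in life:
--             for dx, dy in AROUND:
--                 p = (x + dx, y + dy)
--                 counts[p] = counts.get(p, 0) + 1
--         life = {p for p, c in counts.items()
--                 if c == 3 or (c == 2 and p in life)}
--     return len(life)
-- ===== Notes on version B (the rewrite author's own statement) =====
-- stated objective: alternative
-- what changed: Instead of re-counting the 8 neighbours of each of the 9 cells around every live cell (72 membership tests per live cell per tick), B makes one pass over the live cells incrementing a neighbour-count dictionary (8 dict updates per live cell) and then applies the birth/survival rules once per counted candidate; it does less work per tick but a timing run's workload showed no measured speed-up.
import Mathlib
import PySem

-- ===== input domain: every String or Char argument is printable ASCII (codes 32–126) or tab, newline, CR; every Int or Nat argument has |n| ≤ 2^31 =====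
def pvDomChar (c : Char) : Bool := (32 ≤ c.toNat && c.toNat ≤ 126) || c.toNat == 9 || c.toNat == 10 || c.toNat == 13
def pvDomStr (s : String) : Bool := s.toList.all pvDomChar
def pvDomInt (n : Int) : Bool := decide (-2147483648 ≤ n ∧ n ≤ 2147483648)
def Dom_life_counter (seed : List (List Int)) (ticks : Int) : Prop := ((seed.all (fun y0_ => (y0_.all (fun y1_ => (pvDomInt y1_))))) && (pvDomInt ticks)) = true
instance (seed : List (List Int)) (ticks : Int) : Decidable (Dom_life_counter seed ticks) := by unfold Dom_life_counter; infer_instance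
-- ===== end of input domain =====

-- B replaces A's 72 membership tests per live cell per tick (8 neighbour counts for each of
-- 9 candidate cells) by one neighbour-count dictionary built in a single pass (8 dict updates
-- per live cell), then applies the rules once per counted candidate (alternative algorithm).

-- ===== PORT A =====
def pvAROUND : List (Int × Int) :=
  [(-1, -1), (-1, 0), (-1, 1), (0, -1), (0, 1), (1, -1), (1, 0), (1, 1)]

def pvCELLS : List (Int × Int) := pvAROUND ++ [(0, 0)]

-- life = {(x,y) for x in range(len(seed[0])) for y in range(len(seed)) if seed[y][x] == 1}
def pvInitA (seed : List (List Int)) : PySem.Set (Int × Int) :=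
  (PySem.List.pyRange 0 ((PySem.List.pyGetD seed 0 []).length : Int) 1).foldl (fun s x =>
    (PySem.List.pyRange 0 (seed.length : Int) 1).foldl (fun s y =>
      if PySem.List.pyGetD (PySem.List.pyGetD seed y []) x 0 == 1 then PySem.Set.add s (x, y)
      else s) s) []

-- count = sum((locate(pos, cell) in life) for cell in AROUND)
def pvCountA (life : PySem.Set (Int × Int)) (pos : Int × Int) : Int :=
  (pvAROUND.map (fun cell =>
    if PySem.Set.contains life (pos.1 + cell.1, pos.2 + cell.2) then (1 : Int) else 0)).sum

-- the body of A's 'for pos in …' loop (count, then the three branches)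
def pvBodyA (life new_life : PySem.Set (Int × Int)) (pos : Int × Int) : PySem.Set (Int × Int) :=
  let count : Int := pvCountA life pos
  if count == 2 then
    (if PySem.Set.contains life pos then PySem.Set.add new_life pos else new_life)
  else if count == 3 then PySem.Set.add new_life pos
  else new_life

-- one body of A's 'for __ in range(ticks)' loop
def pvStepA (life : PySem.Set (Int × Int)) : PySem.Set (Int × Int) :=
  life.foldl (fun new_life living =>
    (pvCELLS.map (fun cell => (living.1 + cell.1, living.2 + cell.2))).foldl
      (pvBodyA life) new_life) []

def life_counter (seed : List (List Int)) (ticks : Int) : Int :=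
  PySem.Set.len
    ((PySem.List.pyRange 0 ticks 1).foldl (fun life _ => pvStepA life) (pvInitA seed))

-- ===== PORT B =====
-- life = {(x, y) for y, row in enumerate(seed) for x in range(width) if row[x] == 1}
def pvInitB (seed : List (List Int)) : PySem.Set (Int × Int) :=
  let width : Int := ((PySem.List.pyGetD seed 0 []).length : Int)
  (PySem.List.enumerate seed).foldl (fun s yrow =>
    (PySem.List.pyRange 0 width 1).foldl (fun s x =>
      if PySem.List.pyGetD yrow.2 x 0 == 1 then PySem.Set.add s (x, yrow.1) else s) s) []

-- counts[p] = counts.get(p, 0) + 1 over the 8 neighbours of every live cell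
def pvCountsB (life : PySem.Set (Int × Int)) : PySem.Dict (Int × Int) Int :=
  life.foldl (fun counts xy =>
    pvAROUND.foldl (fun counts dxy =>
      let p := (xy.1 + dxy.1, xy.2 + dxy.2)
      counts.insert p (counts.getD p 0 + 1)) counts) PySem.Dict.empty

-- the filter of B's set comprehension: c == 3 or (c == 2 and p in life)
def pvBodyB (life s : PySem.Set (Int × Int)) (pc : (Int × Int) × Int) : PySem.Set (Int × Int) :=
  if pc.2 == 3 || (pc.2 == 2 && PySem.Set.contains life pc.1) then PySem.Set.add s pc.1
  else s

-- life = {p for p, c in counts.items() if c == 3 or (c == 2 and p in life)}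
def pvStepB (life : PySem.Set (Int × Int)) : PySem.Set (Int × Int) :=
  let counts := pvCountsB life
  counts.items.foldl (pvBodyB life) []

def life_counter_alt (seed : List (List Int)) (ticks : Int) : Int :=
  PySem.Set.len
    ((PySem.List.pyRange 0 ticks 1).foldl (fun life _ => pvStepB life) (pvInitB seed))

-- ===== PRECONDITION & SPEC =====
-- Pre_ excludes exactly the inputs on which the Python A raises IndexError: an empty seed
-- (seed[0]) and a ragged seed whose later row is shorter than row 0 (seed[y][x]); B raises there too.
def Pre_life_counter (seed : List (List Int)) (_ticks : Int) : Prop :=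
  seed ≠ [] ∧ ∀ row ∈ seed, (seed.headD []).length ≤ row.length
instance (seed : List (List Int)) (ticks : Int) : Decidable (Pre_life_counter seed ticks) := by
  unfold Pre_life_counter; infer_instance
def pvWitness_life_counter : List (List Int) × Int := ([[1, 1, 0], [1, 0, 0], [0, 1, 0]], 2)

def Spec_life_counter (seed : List (List Int)) (ticks : Int) (out : Int) : Prop :=
  out = life_counter_alt seed ticks
instance (seed : List (List Int)) (ticks : Int) (out : Int) : Decidable (Spec_life_counter seed ticks out) := by
  unfold Spec_life_counter; infer_instance

-- ===== CLAIM (what is proved, stated in full; the proofs are below) =====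
def Claim_equal_life_counter : Prop := ∀ (seed : List (List Int)) (ticks : Int), Dom_life_counter seed ticks → Pre_life_counter seed ticks → Spec_life_counter seed ticks (life_counter seed ticks)

-- ===== LEMMAS AND PROOFS =====

-- number of live neighbours of q (counts multiplicity in l; l is always duplicate-free here)
def pvNbr (l : List (Int × Int)) (q : Int × Int) : Nat :=
  l.countP (fun p => decide ((q.1 - p.1, q.2 - p.2) ∈ pvAROUND))

-- membership in the literal 8-neighbour offset list, arithmetically
theorem pv_mem_around (a b : Int) :
    (a, b) ∈ pvAROUND ↔ (¬(a = 0 ∧ b = 0) ∧ -1 ≤ a ∧ a ≤ 1 ∧ -1 ≤ b ∧ b ≤ 1) := by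
  simp only [pvAROUND, List.mem_cons, List.not_mem_nil, or_false, Prod.mk.injEq]
  omega

-- the 8-neighbour offset set is symmetric
theorem pv_around_symm (p q : Int × Int) :
    (q.1 - p.1, q.2 - p.2) ∈ pvAROUND ↔ (p.1 - q.1, p.2 - q.2) ∈ pvAROUND := by
  rw [pv_mem_around, pv_mem_around]; omega

theorem pv_mem_translate (t r : Int × Int) :
    r ∈ pvAROUND.map (fun c => (t.1 + c.1, t.2 + c.2)) ↔ (r.1 - t.1, r.2 - t.2) ∈ pvAROUND := by
  constructor
  · rintro h
    simp only [List.mem_map] at h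
    obtain ⟨c, hc, rfl⟩ := h
    simpa using hc
  · intro h
    refine List.mem_map.2 ⟨(r.1 - t.1, r.2 - t.2), h, ?_⟩
    simp

theorem pv_nodup_translate (t : Int × Int) :
    (pvAROUND.map (fun c => (t.1 + c.1, t.2 + c.2))).Nodup := by
  apply List.Nodup.map
  · intro a b hab
    simp only [Prod.mk.injEq] at hab
    obtain ⟨h1, h2⟩ := hab
    exact Prod.ext (by omega) (by omega)
  · decide

-- membership in a conditional-add style fold, generically
theorem pv_mem_foldl {α β : Type} (g : List α → β → List α) (C : β → α → Prop)
    (h : ∀ s b y, y ∈ g s b ↔ y ∈ s ∨ C b y) :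
    ∀ (l : List β) (s0 : List α) (y : α), y ∈ l.foldl g s0 ↔ y ∈ s0 ∨ ∃ b ∈ l, C b y := by
  intro l
  induction l with
  | nil => simp
  | cons b t ih =>
    intro s0 y
    rw [List.foldl_cons, ih, h]
    simp only [List.mem_cons]
    constructor
    · rintro (⟨hy | hy⟩ | ⟨b', hb', hy⟩)
      · exact Or.inl hy
      · exact Or.inr ⟨b, Or.inl rfl, hy⟩
      · exact Or.inr ⟨b', Or.inr hb', hy⟩
    · rintro (hy | ⟨b', hb' | hb', hy⟩)
      · exact Or.inl (Or.inl hy)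
      · exact Or.inl (Or.inr (hb' ▸ hy))
      · exact Or.inr ⟨b', hb', hy⟩

theorem pv_nodup_foldl {α β : Type} (g : List α → β → List α)
    (h : ∀ s b, s.Nodup → (g s b).Nodup) :
    ∀ (l : List β) (s0 : List α), s0.Nodup → (l.foldl g s0).Nodup := by
  intro l
  induction l with
  | nil => intro s0 hs; simpa using hs
  | cons b t ih => intro s0 hs; exact ih _ (h _ _ hs)

-- |{x ∈ s : x ∈ l}| = |{x ∈ l : x ∈ s}| for duplicate-free lists (predicates abstracted)
theorem pv_filter_mem_comm {α : Type} (l s : List α) (f g : α → Bool)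
    (hf : ∀ x, f x = true ↔ x ∈ l) (hg : ∀ x, g x = true ↔ x ∈ s)
    (hl : l.Nodup) (hs : s.Nodup) :
    (s.filter f).length = (l.filter g).length := by
  apply List.Perm.length_eq
  rw [List.perm_ext_iff_of_nodup (hs.filter _) (hl.filter _)]
  intro x
  simp only [List.mem_filter, hf, hg]
  tauto

-- A's per-candidate neighbour sum IS pvNbr (for duplicate-free life)
theorem pv_cntA (l : List (Int × Int)) (hl : l.Nodup) (q : Int × Int) :
    pvCountA l q = (pvNbr l q : Int) := by
  unfold pvCountA
  rw [PySem.List.sum_map_ite_one_zero]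
  unfold pvNbr
  norm_cast
  rw [List.countP_eq_length_filter, List.countP_eq_length_filter]
  have hdec : ∀ r : Int × Int, decide (r ∈ l) = PySem.Set.contains l r := by
    intro r; rw [Bool.eq_iff_iff]; simp
  have h1 : (pvAROUND.filter (fun c => PySem.Set.contains l (q.1 + c.1, q.2 + c.2))).length
      = ((pvAROUND.map (fun c => (q.1 + c.1, q.2 + c.2))).filter (fun r => decide (r ∈ l))).length := by
    rw [List.filter_map, List.length_map]
    congr 1
    apply List.filter_congr
    intro c _
    simp only [Function.comp]
    exact (hdec _).symm
  rw [h1]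
  exact pv_filter_mem_comm l (pvAROUND.map fun c => (q.1 + c.1, q.2 + c.2))
    (fun r => decide (r ∈ l)) (fun p => decide ((q.1 - p.1, q.2 - p.2) ∈ pvAROUND))
    (fun x => by simp) (fun x => by
      simp only [decide_eq_true_eq]
      exact (pv_around_symm x q).trans (pv_mem_translate q x).symm)
    hl (pv_nodup_translate q)

-- B's counter value at q IS pvNbr
theorem pv_getD_counts_aux (l : List (Int × Int)) :
    ∀ (d : PySem.Dict (Int × Int) Int) (q : Int × Int),
      (l.foldl (fun counts xy =>
        pvAROUND.foldl (fun counts dxy =>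
          let p := (xy.1 + dxy.1, xy.2 + dxy.2)
          counts.insert p (counts.getD p 0 + 1)) counts) d).getD q 0
        = d.getD q 0 + (pvNbr l q : Int) := by
  induction l with
  | nil => intro d q; simp [pvNbr]
  | cons p0 t ih =>
    intro d q
    rw [List.foldl_cons, ih]
    have hfold : (pvAROUND.foldl (fun counts dxy =>
        let p := (p0.1 + dxy.1, p0.2 + dxy.2)
        counts.insert p (counts.getD p 0 + 1)) d)
        = ((pvAROUND.map (fun c => (p0.1 + c.1, p0.2 + c.2))).foldl
            (fun d x => d.insert x (d.getD x 0 + 1)) d) :=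
      (List.foldl_map (f := fun c : Int × Int => (p0.1 + c.1, p0.2 + c.2))
        (g := fun (d : PySem.Dict (Int × Int) Int) x => d.insert x (d.getD x 0 + 1))
        (l := pvAROUND) (init := d)).symm
    rw [hfold, PySem.Dict.getD_foldl_insert_add_one]
    have hcount : ((pvAROUND.map (fun c => (p0.1 + c.1, p0.2 + c.2))).count q)
        = if (q.1 - p0.1, q.2 - p0.2) ∈ pvAROUND then 1 else 0 := by
      by_cases hq : q ∈ pvAROUND.map (fun c => (p0.1 + c.1, p0.2 + c.2))
      · rw [List.count_eq_one_of_mem (pv_nodup_translate p0) hq,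
          if_pos ((pv_mem_translate p0 q).1 hq)]
      · rw [List.count_eq_zero.2 hq, if_neg (fun hmem => hq ((pv_mem_translate p0 q).2 hmem))]
    have hnbr : pvNbr (p0 :: t) q = pvNbr t q + if (q.1 - p0.1, q.2 - p0.2) ∈ pvAROUND then 1 else 0 := by
      unfold pvNbr
      rw [List.countP_cons]
      by_cases hp : (q.1 - p0.1, q.2 - p0.2) ∈ pvAROUND <;> simp [hp]
    rw [hcount, hnbr]
    by_cases hp : (q.1 - p0.1, q.2 - p0.2) ∈ pvAROUND <;> simp [hp] <;> ring

theorem pv_keys_counts_aux (l : List (Int × Int)) :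
    ∀ (d : PySem.Dict (Int × Int) Int),
      (l.foldl (fun counts xy =>
        pvAROUND.foldl (fun counts dxy =>
          let p := (xy.1 + dxy.1, xy.2 + dxy.2)
          counts.insert p (counts.getD p 0 + 1)) counts) d).keys
        = PySem.Set.update d.keys (l.flatMap (fun p => pvAROUND.map (fun c => (p.1 + c.1, p.2 + c.2)))) := by
  induction l with
  | nil => intro d; simp [PySem.Set.update]
  | cons p0 t ih =>
    intro d
    rw [List.foldl_cons, ih]
    have hfold : (pvAROUND.foldl (fun counts dxy =>
        let p := (p0.1 + dxy.1, p0.2 + dxy.2)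
        counts.insert p (counts.getD p 0 + 1)) d)
        = ((pvAROUND.map (fun c => (p0.1 + c.1, p0.2 + c.2))).foldl
            (fun d x => d.insert x (d.getD x 0 + 1)) d) :=
      (List.foldl_map (f := fun c : Int × Int => (p0.1 + c.1, p0.2 + c.2))
        (g := fun (d : PySem.Dict (Int × Int) Int) x => d.insert x (d.getD x 0 + 1))
        (l := pvAROUND) (init := d)).symm
    rw [hfold, PySem.Dict.keys_foldl_insert (f := fun d x => d.getD x 0 + 1)]
    rw [List.flatMap_cons, PySem.Set.update_append]

theorem pv_contains_counts (l : List (Int × Int)) (q : Int × Int) :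
    (pvCountsB l).contains q = true ↔ 0 < pvNbr l q := by
  rw [PySem.Dict.contains_iff_mem_keys]
  unfold pvCountsB
  rw [pv_keys_counts_aux]
  rw [PySem.Set.mem_update]
  simp only [PySem.Dict.keys_empty, List.not_mem_nil, false_or, List.mem_flatMap]
  unfold pvNbr
  rw [List.countP_pos_iff]
  constructor
  · rintro ⟨p, hp, hq⟩
    exact ⟨p, hp, by simpa using (pv_mem_translate p q).1 hq⟩
  · rintro ⟨p, hp, hq⟩
    exact ⟨p, hp, (pv_mem_translate p q).2 (by simpa using hq)⟩

theorem pv_nodup_keys_counts (l : List (Int × Int)) : (pvCountsB l).keys.Nodup := by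
  unfold pvCountsB
  rw [pv_keys_counts_aux]
  exact PySem.Set.nodup_update _ _ (by simp [PySem.Dict.keys_empty])

theorem pv_getD_counts (l : List (Int × Int)) (q : Int × Int) :
    (pvCountsB l).getD q 0 = (pvNbr l q : Int) := by
  unfold pvCountsB
  rw [pv_getD_counts_aux]
  simp [PySem.Dict.getD_empty]

-- every cell with a live neighbour, and every live cell itself, is one of A's candidates
theorem pv_mem_cells_translate (p x : Int × Int)
    (h : (x.1 - p.1, x.2 - p.2) ∈ pvAROUND ∨ x = p) :
    x ∈ pvCELLS.map (fun cell => (p.1 + cell.1, p.2 + cell.2)) := by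
  rcases h with h | rfl
  · exact List.mem_map.2 ⟨(x.1 - p.1, x.2 - p.2), by simp [pvCELLS, h], by simp⟩
  · exact List.mem_map.2 ⟨(0, 0), by simp [pvCELLS], by simp⟩

theorem pv_mem_bodyA (life nl : PySem.Set (Int × Int)) (pos y : Int × Int) :
    y ∈ pvBodyA life nl pos ↔
      y ∈ nl ∨ (((pvCountA life pos = 2 ∧ pos ∈ life) ∨ pvCountA life pos = 3) ∧ y = pos) := by
  unfold pvBodyA
  by_cases h2 : pvCountA life pos = 2 <;> by_cases h3 : pvCountA life pos = 3 <;>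
    by_cases hin : pos ∈ life <;>
    simp [h2, h3, hin, PySem.Set.mem_add]

theorem pv_mem_bodyB (life s : PySem.Set (Int × Int)) (pc : (Int × Int) × Int) (y : Int × Int) :
    y ∈ pvBodyB life s pc ↔
      y ∈ s ∨ ((pc.2 = 3 ∨ (pc.2 = 2 ∧ pc.1 ∈ life)) ∧ y = pc.1) := by
  unfold pvBodyB
  by_cases h3 : pc.2 = 3 <;> by_cases h2 : pc.2 = 2 <;> by_cases hin : pc.1 ∈ life <;>
    simp [h2, h3, hin, PySem.Set.mem_add]

-- membership characterisation of one A-step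
theorem pv_mem_stepA (l : List (Int × Int)) (hl : l.Nodup) (x : Int × Int) :
    x ∈ pvStepA l ↔ (pvNbr l x = 3 ∨ (pvNbr l x = 2 ∧ x ∈ l)) := by
  unfold pvStepA
  rw [pv_mem_foldl
    (fun new_life living =>
      (pvCELLS.map (fun cell => (living.1 + cell.1, living.2 + cell.2))).foldl
        (pvBodyA l) new_life)
    (fun living y => ∃ pos ∈ pvCELLS.map (fun cell => (living.1 + cell.1, living.2 + cell.2)),
      (((pvCountA l pos = 2 ∧ pos ∈ l) ∨ pvCountA l pos = 3) ∧ y = pos))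
    (fun s living y => pv_mem_foldl (pvBodyA l) _ (pv_mem_bodyA l) _ s y) l [] x]
  simp only [List.not_mem_nil, false_or]
  have hcnt : ∀ pos, pvCountA l pos = (pvNbr l pos : Int) := pv_cntA l hl
  constructor
  · rintro ⟨living, _, pos, _, hrule, rfl⟩
    rcases hrule with ⟨h2, hin⟩ | h3
    · exact Or.inr ⟨by rw [hcnt] at h2; exact_mod_cast h2, hin⟩
    · exact Or.inl (by rw [hcnt] at h3; exact_mod_cast h3)
  · rintro (h3 | ⟨h2, hin⟩)
    · have hpos : 0 < pvNbr l x := by omega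
      unfold pvNbr at hpos
      obtain ⟨p, hp, hx⟩ := List.countP_pos_iff.1 hpos
      exact ⟨p, hp, x, pv_mem_cells_translate p x (Or.inl (by simpa using hx)),
        Or.inr (by rw [hcnt]; exact_mod_cast h3), rfl⟩
    · exact ⟨x, hin, x, pv_mem_cells_translate x x (Or.inr rfl),
        Or.inl ⟨by rw [hcnt]; exact_mod_cast h2, hin⟩, rfl⟩

-- membership characterisation of one B-step
theorem pv_mem_stepB (l : List (Int × Int)) (x : Int × Int) :
    x ∈ pvStepB l ↔ (pvNbr l x = 3 ∨ (pvNbr l x = 2 ∧ x ∈ l)) := by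
  have hfold : x ∈ pvStepB l ↔
      x ∈ ([] : List (Int × Int)) ∨
        ∃ pc ∈ (pvCountsB l).items, ((pc.2 = 3 ∨ (pc.2 = 2 ∧ pc.1 ∈ l)) ∧ x = pc.1) :=
    pv_mem_foldl (pvBodyB l) _ (pv_mem_bodyB l) (pvCountsB l).items [] x
  rw [hfold]
  simp only [List.not_mem_nil, false_or]
  constructor
  · rintro ⟨pc, hpc, hcond, rfl⟩
    have hv : (pvCountsB l).getD pc.1 0 = pc.2 :=
      PySem.Dict.getD_of_mem_items _ (by simpa using hpc) (pv_nodup_keys_counts l) 0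
    rw [pv_getD_counts] at hv
    rcases hcond with h3 | ⟨h2, hin⟩
    · exact Or.inl (by rw [← hv] at h3; exact_mod_cast h3)
    · exact Or.inr ⟨by rw [← hv] at h2; exact_mod_cast h2, hin⟩
  · intro h
    have hposn : 0 < pvNbr l x := by rcases h with h | ⟨h, _⟩ <;> omega
    have hcont := (pv_contains_counts l x).2 hposn
    have hsome : ∃ v, (pvCountsB l).get? x = some v := by
      rw [PySem.Dict.contains_eq_isSome_get?] at hcont
      exact Option.isSome_iff_exists.1 hcont
    obtain ⟨v, hv⟩ := hsome
    have hvv : v = (pvNbr l x : Int) := by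
      have := PySem.Dict.getD_of_get?_eq_some (pvCountsB l) 0 hv
      rw [pv_getD_counts] at this
      omega
    refine ⟨(x, v), (PySem.Dict.get?_eq_some_iff_mem_items _ _ _ (pv_nodup_keys_counts l)).1 hv,
      ?_, rfl⟩
    subst hvv
    dsimp only
    rcases h with h3 | ⟨h2, hin⟩
    · exact Or.inl (by exact_mod_cast h3)
    · exact Or.inr ⟨by exact_mod_cast h2, hin⟩

theorem pv_nodup_stepA (l : List (Int × Int)) : (pvStepA l).Nodup := by
  unfold pvStepA
  refine pv_nodup_foldl _ ?_ l [] List.nodup_nil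
  intro s living hs
  refine pv_nodup_foldl (pvBodyA l) ?_ _ s hs
  intro s' pos hs'
  have hb : pvBodyA l s' pos =
      if pvCountA l pos == 2 then
        (if PySem.Set.contains l pos then PySem.Set.add s' pos else s')
      else if pvCountA l pos == 3 then PySem.Set.add s' pos else s' := rfl
  rw [hb]
  split_ifs <;> first | exact PySem.Set.nodup_add _ _ hs' | exact hs'

theorem pv_nodup_stepB (l : List (Int × Int)) : (pvStepB l).Nodup := by
  have : (pvStepB l) = (pvCountsB l).items.foldl (pvBodyB l) [] := rfl
  rw [this]
  refine pv_nodup_foldl (pvBodyB l) ?_ _ [] List.nodup_nil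
  intro s pc hs
  unfold pvBodyB
  split_ifs <;> first | exact PySem.Set.nodup_add _ _ hs | exact hs

theorem pv_nbr_congr (l l' : List (Int × Int)) (hl : l.Nodup) (hl' : l'.Nodup)
    (hm : ∀ x, x ∈ l ↔ x ∈ l') (q : Int × Int) : pvNbr l q = pvNbr l' q := by
  exact List.Perm.countP_eq _ ((List.perm_ext_iff_of_nodup hl hl').2 hm)

-- both initial sets hold exactly the coordinates of the 1-cells read by the comprehensions
theorem pv_mem_initA_char (seed : List (List Int)) (v : Int × Int) :
    v ∈ pvInitA seed ↔
      ∃ (k : Nat) (x : Int), k < seed.length ∧ 0 ≤ x ∧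
        x < ((PySem.List.pyGetD seed 0 []).length : Int) ∧
        PySem.List.pyGetD (PySem.List.pyGetD seed (k : Int) []) x 0 = 1 ∧ v = (x, (k : Int)) := by
  unfold pvInitA
  have hinner : ∀ (x : Int) (s : List (Int × Int)) (w : Int × Int),
      w ∈ (PySem.List.pyRange 0 (seed.length : Int) 1).foldl
        (fun s y => if PySem.List.pyGetD (PySem.List.pyGetD seed y []) x 0 == 1 then
          PySem.Set.add s (x, y) else s) s
      ↔ w ∈ s ∨ ∃ y ∈ PySem.List.pyRange 0 (seed.length : Int) 1,
          (PySem.List.pyGetD (PySem.List.pyGetD seed y []) x 0 = 1 ∧ w = (x, y)) := by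
    intro x s w
    refine pv_mem_foldl _
      (fun y w => PySem.List.pyGetD (PySem.List.pyGetD seed y []) x 0 = 1 ∧ w = (x, y)) ?_ _ s w
    intro s' y w'
    by_cases hc : PySem.List.pyGetD (PySem.List.pyGetD seed y []) x 0 = 1 <;>
      simp [hc, PySem.Set.mem_add]
  have houter := pv_mem_foldl _
    (fun x w => ∃ y ∈ PySem.List.pyRange 0 (seed.length : Int) 1,
      (PySem.List.pyGetD (PySem.List.pyGetD seed y []) x 0 = 1 ∧ w = (x, y)))
    (fun s x w => hinner x s w)
    (PySem.List.pyRange 0 ((PySem.List.pyGetD seed 0 []).length : Int) 1) [] v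
  rw [houter]
  simp only [List.not_mem_nil, false_or, PySem.List.mem_pyRange_one]
  constructor
  · rintro ⟨x, ⟨hx0, hxw⟩, y, ⟨hy0, hyh⟩, hcell, rfl⟩
    refine ⟨y.toNat, x, by omega, hx0, hxw, ?_, ?_⟩
    · rw [Int.toNat_of_nonneg hy0]; exact hcell
    · rw [Int.toNat_of_nonneg hy0]
  · rintro ⟨k, x, hk, hx0, hxw, hcell, rfl⟩
    exact ⟨x, ⟨hx0, hxw⟩, (k : Int), ⟨Int.natCast_nonneg k, by exact_mod_cast hk⟩, hcell, rfl⟩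

theorem pv_mem_initB_char (seed : List (List Int)) (v : Int × Int) :
    v ∈ pvInitB seed ↔
      ∃ (k : Nat) (x : Int), k < seed.length ∧ 0 ≤ x ∧
        x < ((PySem.List.pyGetD seed 0 []).length : Int) ∧
        PySem.List.pyGetD (PySem.List.pyGetD seed (k : Int) []) x 0 = 1 ∧ v = (x, (k : Int)) := by
  have hB : pvInitB seed = (PySem.List.enumerate seed).foldl (fun s yrow =>
      (PySem.List.pyRange 0 ((PySem.List.pyGetD seed 0 []).length : Int) 1).foldl (fun s x =>
        if PySem.List.pyGetD yrow.2 x 0 == 1 then PySem.Set.add s (x, yrow.1) else s) s) [] := rfl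
  rw [hB]
  have hinner : ∀ (yrow : Int × List Int) (s : List (Int × Int)) (w : Int × Int),
      w ∈ (PySem.List.pyRange 0 ((PySem.List.pyGetD seed 0 []).length : Int) 1).foldl (fun s x =>
        if PySem.List.pyGetD yrow.2 x 0 == 1 then PySem.Set.add s (x, yrow.1) else s) s
      ↔ w ∈ s ∨ ∃ x ∈ PySem.List.pyRange 0 ((PySem.List.pyGetD seed 0 []).length : Int) 1,
          (PySem.List.pyGetD yrow.2 x 0 = 1 ∧ w = (x, yrow.1)) := by
    intro yrow s w
    refine pv_mem_foldl _
      (fun x w => PySem.List.pyGetD yrow.2 x 0 = 1 ∧ w = (x, yrow.1)) ?_ _ s w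
    intro s' x w'
    by_cases hc : PySem.List.pyGetD yrow.2 x 0 = 1 <;>
      simp [hc, PySem.Set.mem_add]
  have houter := pv_mem_foldl _
    (fun yrow w => ∃ x ∈ PySem.List.pyRange 0 ((PySem.List.pyGetD seed 0 []).length : Int) 1,
      (PySem.List.pyGetD yrow.2 x 0 = 1 ∧ w = (x, yrow.1)))
    (fun s yrow w => hinner yrow s w)
    (PySem.List.enumerate seed) [] v
  rw [houter]
  simp only [List.not_mem_nil, false_or, PySem.List.mem_pyRange_one]
  constructor
  · rintro ⟨yrow, hyr, x, ⟨hx0, hxw⟩, hcell, rfl⟩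
    obtain ⟨k, hk, rfl⟩ := (PySem.List.mem_enumerate_iff _ _ _).1 hyr
    refine ⟨k, x, hk, hx0, hxw, ?_, by simp⟩
    rw [PySem.List.pyGetD_natCast, List.getD_eq_getElem _ _ hk]
    simpa using hcell
  · rintro ⟨k, x, hk, hx0, hxw, hcell, rfl⟩
    refine ⟨((k : Int), seed[k]), (PySem.List.mem_enumerate_iff _ _ _).2 ⟨k, hk, by simp⟩,
      x, ⟨hx0, hxw⟩, ?_, rfl⟩
    rw [PySem.List.pyGetD_natCast, List.getD_eq_getElem _ _ hk] at hcell
    simpa using hcell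

theorem pv_mem_init (seed : List (List Int)) (v : Int × Int) :
    v ∈ pvInitA seed ↔ v ∈ pvInitB seed := by
  rw [pv_mem_initA_char, pv_mem_initB_char]

theorem pv_nodup_initA (seed : List (List Int)) : (pvInitA seed).Nodup := by
  unfold pvInitA
  refine pv_nodup_foldl _ ?_ _ [] List.nodup_nil
  intro s x hs
  refine pv_nodup_foldl _ ?_ _ s hs
  intro s' y hs'
  split_ifs
  · exact PySem.Set.nodup_add _ _ hs'
  · exact hs'

theorem pv_nodup_initB (seed : List (List Int)) : (pvInitB seed).Nodup := by
  have hB : pvInitB seed = (PySem.List.enumerate seed).foldl (fun s yrow =>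
      (PySem.List.pyRange 0 ((PySem.List.pyGetD seed 0 []).length : Int) 1).foldl (fun s x =>
        if PySem.List.pyGetD yrow.2 x 0 == 1 then PySem.Set.add s (x, yrow.1) else s) s) [] := rfl
  rw [hB]
  refine pv_nodup_foldl _ ?_ _ [] List.nodup_nil
  intro s yrow hs
  refine pv_nodup_foldl _ ?_ _ s hs
  intro s' x hs'
  split_ifs
  · exact PySem.Set.nodup_add _ _ hs'
  · exact hs'

theorem pv_iterate (r : List Int) :
    ∀ (l l' : List (Int × Int)), l.Nodup → l'.Nodup → (∀ x, x ∈ l ↔ x ∈ l') →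
      (r.foldl (fun life _ => pvStepA life) l).Nodup ∧
      (r.foldl (fun life _ => pvStepB life) l').Nodup ∧
      (∀ x, x ∈ r.foldl (fun life _ => pvStepA life) l ↔ x ∈ r.foldl (fun life _ => pvStepB life) l') := by
  induction r with
  | nil => intro l l' hl hl' hm; exact ⟨hl, hl', hm⟩
  | cons a t ih =>
    intro l l' hl hl' hm
    refine ih _ _ (pv_nodup_stepA l) (pv_nodup_stepB l') ?_
    intro x
    rw [pv_mem_stepA l hl x, pv_mem_stepB l' x, pv_nbr_congr l l' hl hl' hm, hm x]

-- ===== VERDICT (by name: the statement is the Claim_ definition above) =====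
theorem life_counter_spec : Claim_equal_life_counter := by
  intro seed ticks _ _
  unfold Spec_life_counter life_counter life_counter_alt
  obtain ⟨h1, h2, h3⟩ := pv_iterate (PySem.List.pyRange 0 ticks 1) (pvInitA seed) (pvInitB seed)
    (pv_nodup_initA seed) (pv_nodup_initB seed) (pv_mem_init seed)
  have hlen := List.Perm.length_eq ((List.perm_ext_iff_of_nodup h1 h2).2 h3)
  simp only [PySem.Set.len]
  exact_mod_cast hlen
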